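-- pv_equiv track=rewrite | github.com/simonbrahan/aoc2025 | 02/p1.py | first_candidate_after
-- ===== SOURCE A (Python) =====
-- import math
--
-- def count_digits(num):
--     return int(math.log10(num)) + 1
--
-- def first_candidate_after(num):
--     digit_count = count_digits(num)
--
--     # if input has odd number of digits, start with the next number with an even number of digits
--     if digit_count % 2 == 1:
--         half = '1' + '0' * ((digit_count - 1) // 2)
--     else:
--         half = str(num)[:digit_count // 2]
--
--     out = int(half + half)
--
--     while out <= num:
--         half = str(int(half) + 1)
--         out = int(half + half)
--
--     return out
-- ===== SOURCE B (Python) =====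
-- import math
--
--
-- def first_candidate_after(num):
--     # same digit-count expression as A (keeps the ValueError on num <= 0)
--     d = int(math.log10(num)) + 1
--     h = d // 2
--     p = 10 ** h
--     if d % 2 == 1:
--         # smallest even-length mirror number is 10**h concatenated with itself
--         return p * (10 * p + 1)
--     top = num // p
--     cand = top * (p + 1)          # mirror of num's upper half
--     if cand > num:
--         return cand
--     if top + 1 == p:              # upper half was all nines: mirror gains a digit
--         return p * (10 * p + 1)
--     return (top + 1) * (p + 1)
-- ===== Notes on version B (the rewrite author's own statement) =====
-- stated objective: simpler
-- what changed: Replaces A's string build/slice/concat-and-reparse plus while-loop with pure integer arithmetic and a three-way branch: the mirror of the upper half is top*(10**h+1), computed directly, with one closed-form increment step instead of a loop.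
import Mathlib
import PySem

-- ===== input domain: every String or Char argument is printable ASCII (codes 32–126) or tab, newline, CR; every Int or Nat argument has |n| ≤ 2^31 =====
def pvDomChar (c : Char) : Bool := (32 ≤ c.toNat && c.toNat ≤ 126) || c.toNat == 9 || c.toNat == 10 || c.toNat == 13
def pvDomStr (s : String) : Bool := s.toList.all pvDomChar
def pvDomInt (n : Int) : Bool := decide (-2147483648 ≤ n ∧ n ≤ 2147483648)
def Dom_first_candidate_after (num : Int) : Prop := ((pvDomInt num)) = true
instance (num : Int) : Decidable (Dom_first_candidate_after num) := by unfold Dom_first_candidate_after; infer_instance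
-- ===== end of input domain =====

-- B replaces A's digit-string slicing/concatenation and while-loop by closed-form integer
-- arithmetic on the number's halves (same values, no string work besides the shared digit count).


-- ===== PORT A =====
-- hand port of `int(math.log10(num)) + 1` (Lean has no floats): on the admitted domain
-- 1 ≤ num ≤ 2^31 the float expression equals the decimal digit count of num, which is
-- (Nat.toDigits 10 num.toNat).length (verified exhaustively around every power of ten).
def count_digits (num : Int) : Int := ((Nat.toDigits 10 num.toNat).length : Int)

-- the `while out <= num:` loop; the fuel argument only makes the recursion structural
-- (int(half) grows by 1 each pass and the loop stops once out ≥ int(half) > num,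
-- so num.toNat + 2 passes are never exhausted on the admitted domain)
def fcaLoop (num : Int) : Nat → String → Int → Int
  | 0, _, out => out
  | fuel + 1, half, out =>
    if out ≤ num then
      let half' := PySem.Int.toStr ((PySem.Int.ofStr? half).getD 0 + 1)
      fcaLoop num fuel half' ((PySem.Int.ofStr? (half' ++ half')).getD 0)
    else out

def first_candidate_after (num : Int) : Int :=
  let digit_count := count_digits num
  let half : String :=
    if PySem.Int.mod digit_count 2 = 1 then
      -- '1' + '0' * ((digit_count - 1) // 2), ported by hand ('0' * k is List.replicate k '0'; exact)
      String.ofList ('1' :: List.replicate (PySem.Int.floordiv (digit_count - 1) 2).toNat '0')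
    else
      PySem.Str.slice (PySem.Int.toStr num) none (some (PySem.Int.floordiv digit_count 2))
  -- int(half + half); the argument is a nonempty digit string, so int() cannot raise (getD unreachable)
  let out := (PySem.Int.ofStr? (half ++ half)).getD 0
  fcaLoop num (num.toNat + 2) half out

-- ===== PORT B =====
def first_candidate_after_alt (num : Int) : Int :=
  let d := count_digits num          -- same digit-count expression as A (Source B keeps the log10 form)
  let h := PySem.Int.floordiv d 2
  let p : Int := (10 : Int) ^ h.toNat  -- 10 ** h (h ≥ 0 whenever num ≥ 1)
  if PySem.Int.mod d 2 = 1 then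
    p * (10 * p + 1)
  else
    let top := PySem.Int.floordiv num p
    if top * (p + 1) > num then top * (p + 1)
    else if top + 1 = p then p * (10 * p + 1)
    else (top + 1) * (p + 1)

-- ===== PRECONDITION & SPEC =====
-- Pre_ excludes exactly num ≤ 0, where Python's math.log10 raises ValueError (both in A and in B).
def Pre_first_candidate_after (num : Int) : Prop := 1 ≤ num
instance (num : Int) : Decidable (Pre_first_candidate_after num) := by
  unfold Pre_first_candidate_after; infer_instance

def pvWitness_first_candidate_after : Int := 1234

def Spec_first_candidate_after (num : Int) (out : Int) : Prop := out = first_candidate_after_alt num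
instance (num : Int) (out : Int) : Decidable (Spec_first_candidate_after num out) := by
  unfold Spec_first_candidate_after; infer_instance

-- ===== CLAIM (what is proved, stated in full; the proofs are below) =====
def Claim_equal_first_candidate_after : Prop :=
  ∀ (num : Int), Dom_first_candidate_after num → Pre_first_candidate_after num →
    Spec_first_candidate_after num (first_candidate_after num)

-- ===== LEMMAS AND PROOFS =====

-- ---- decimal digit value of a digit string (Python's int() on pure digit strings) ----
def valD (ds : List Char) : Nat := ds.foldl (fun a c => a * 10 + (c.toNat - '0'.toNat)) 0

theorem nospace (c : Char) (h : c.isDigit = true) : PySem.Int.isIntSpace c = false := by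
  have h' : 48 ≤ c.toNat ∧ c.toNat ≤ 57 := by
    simpa [Char.isDigit, UInt32.le_iff_toNat_le] using h
  simp only [PySem.Int.isIntSpace, Bool.or_eq_false_iff, decide_eq_false_iff_not]
  refine ⟨⟨⟨⟨⟨?_, ?_⟩, ?_⟩, ?_⟩, ?_⟩, ?_⟩ <;> intro hc <;>
    rw [hc] at h' <;> revert h' <;> decide

theorem dropWhile_eq_self_of (p : Char → Bool) (l : List Char) (h : ∀ x ∈ l, p x = false) :
    l.dropWhile p = l := by
  cases l with
  | nil => rfl
  | cons a t => rw [List.dropWhile_cons_of_neg]; simp [h a (by simp)]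

-- the digit-accumulating recursion of int(), abstracted over the (private) helper of
-- PySem.Int.ofChars?: the hypotheses are discharged definitionally at the use site
theorem go_digits (go : List Char → Bool → Nat → Option Nat)
    (hstep : ∀ c t b a, c.isDigit = true →
      go (c :: t) b a = go t true (a * 10 + (c.toNat - '0'.toNat)))
    (hnil : ∀ b a, go [] b a = if b = true then some a else none) :
    ∀ ds (a : Nat) (b : Bool), (∀ x ∈ ds, x.isDigit = true) → (b = true ∨ ds ≠ []) →
      go ds b a = some (ds.foldl (fun a c => a * 10 + (c.toNat - '0'.toNat)) a) := by
  intro ds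
  induction ds with
  | nil =>
    intro a b _ hb; rw [hnil]
    rcases hb with h | h
    · simp [h]
    · simp at h
  | cons c t ih =>
    intro a b hd hb
    rw [hstep c t b a (hd c (by simp))]
    rw [ih _ true (fun x hx => hd x (by simp [hx])) (Or.inl rfl)]
    rfl

theorem parse_digits (c : Char) (t : List Char) (h : ∀ x ∈ c :: t, x.isDigit = true) :
    PySem.Int.ofChars? (c :: t) = some ((valD (c :: t) : Nat) : Int) := by
  rw [PySem.Int.ofChars?]
  rw [dropWhile_eq_self_of _ _ (fun x hx => nospace x (h x hx))]
  rw [dropWhile_eq_self_of _ _ (fun x hx => nospace x (h x (by simpa using List.mem_reverse.mp hx)))]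
  rw [List.reverse_reverse]
  have hc := h c (by simp)
  split
  · next ds heq => exfalso; cases heq; simp at hc
  · next ds heq => exfalso; cases heq; simp at hc
  · refine Eq.trans (congrArg (fun z => Option.map (fun n : Int => n)
      (z >>= fun a => pure ((a : Nat) : Int))) (?_ : _ = some (valD (c :: t)))) ?_
    · conv_lhs => whnf
      cases instDecidableEqBool c.isDigit true with
      | isFalse hf => exact absurd hc hf
      | isTrue ht =>
        conv_lhs => whnf
        refine Eq.trans (go_digits _
          (by intro c' t' b' a' hcc
              conv_lhs => whnf
              cases instDecidableEqBool c'.isDigit true with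
              | isFalse hf => exact absurd hcc hf
              | isTrue ht' => rfl)
          (by intro b' a'
              conv_lhs => whnf
              rfl)
          t _ true (fun x hx => h x (by simp [hx])) (Or.inl rfl)) ?_
        simp [valD]
    · simp

theorem parse_digits' (cs : List Char) (hne : cs ≠ []) (h : ∀ x ∈ cs, x.isDigit = true) :
    PySem.Int.ofChars? cs = some ((valD cs : Nat) : Int) := by
  cases cs with
  | nil => exact absurd rfl hne
  | cons c t => exact parse_digits c t h

-- ---- Nat.toDigits 10 recurrence ----
theorem tdc_acc : ∀ f n ds, Nat.toDigitsCore 10 f n ds = Nat.toDigitsCore 10 f n [] ++ ds := by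
  intro f
  induction f with
  | zero => intro n ds; simp [Nat.toDigitsCore]
  | succ f ih =>
    intro n ds
    simp only [Nat.toDigitsCore]
    by_cases h : n / 10 = 0
    · simp [h]
    · simp only [h, if_false]
      rw [ih (n / 10) ((n % 10).digitChar :: ds), ih (n / 10) [(n % 10).digitChar]]
      simp

theorem tdc_fuel : ∀ f f' n, n < f → n < f' →
    Nat.toDigitsCore 10 f n [] = Nat.toDigitsCore 10 f' n [] := by
  intro f
  induction f with
  | zero => intro f' n h; omega
  | succ f ih =>
    intro f' n h h'
    cases f' with
    | zero => omega
    | succ f' =>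
      simp only [Nat.toDigitsCore]
      by_cases h0 : n / 10 = 0
      · simp [h0]
      · simp only [h0, if_false]
        rw [tdc_acc f, tdc_acc f']
        rw [ih f' (n / 10) (by omega) (by omega)]

theorem td_small {n : Nat} (h : n < 10) : Nat.toDigits 10 n = [Nat.digitChar n] := by
  have h0 : n / 10 = 0 := by omega
  simp [Nat.toDigits, Nat.toDigitsCore, h0, Nat.mod_eq_of_lt h]

theorem td_rec {n : Nat} (h : 10 ≤ n) :
    Nat.toDigits 10 n = Nat.toDigits 10 (n / 10) ++ [Nat.digitChar (n % 10)] := by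
  have h0 : ¬ n / 10 = 0 := by omega
  conv_lhs => simp only [Nat.toDigits, Nat.toDigitsCore]
  simp only [h0, if_false]
  rw [tdc_acc n]
  rw [tdc_fuel n (n / 10 + 1) (n / 10) (by omega) (by omega)]
  rfl

theorem digitChar_isDigit {m : Nat} (h : m < 10) : (Nat.digitChar m).isDigit = true := by
  interval_cases m <;> decide

theorem digitChar_val {m : Nat} (h : m < 10) : (Nat.digitChar m).toNat - '0'.toNat = m := by
  interval_cases m <;> decide

theorem td_digits : ∀ n, ∀ c ∈ Nat.toDigits 10 n, c.isDigit = true := by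
  intro n
  induction n using Nat.strong_induction_on with
  | _ n ih =>
    by_cases h : n < 10
    · rw [td_small h]; intro c hc; simp at hc; subst hc; exact digitChar_isDigit h
    · rw [td_rec (by omega)]
      intro c hc
      rcases List.mem_append.mp hc with hc | hc
      · exact ih (n / 10) (by omega) c hc
      · simp at hc; subst hc; exact digitChar_isDigit (by omega)

theorem td_ne_nil (n : Nat) : Nat.toDigits 10 n ≠ [] := by
  by_cases h : n < 10
  · rw [td_small h]; simp
  · rw [td_rec (by omega)]; simp

theorem td_len_pos (n : Nat) : 1 ≤ (Nat.toDigits 10 n).length := by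
  cases h : Nat.toDigits 10 n with
  | nil => exact absurd h (td_ne_nil n)
  | cons c t => simp

theorem td_len_bounds : ∀ n, 1 ≤ n →
    10 ^ ((Nat.toDigits 10 n).length - 1) ≤ n ∧ n < 10 ^ (Nat.toDigits 10 n).length := by
  intro n
  induction n using Nat.strong_induction_on with
  | _ n ih =>
    intro h1
    by_cases h : n < 10
    · rw [td_small h]; simp; omega
    · rw [td_rec (by omega)]
      have hq : 1 ≤ n / 10 := by omega
      obtain ⟨hl, hu⟩ := ih (n / 10) (by omega) hq
      have hlp := td_len_pos (n / 10)
      set L := (Nat.toDigits 10 (n / 10)).length with hL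
      constructor
      · have : 10 ^ L ≤ n := by
          calc 10 ^ L = 10 ^ (L - 1) * 10 := by
                rw [← pow_succ]; congr 1; omega
            _ ≤ (n / 10) * 10 := by exact Nat.mul_le_mul_right 10 hl
            _ ≤ n := by omega
        simpa using this
      · have : n < 10 ^ (L + 1) := by
          rw [pow_succ]
          have : n / 10 + 1 ≤ 10 ^ L := hu
          omega
        simpa using this

theorem td_len_eq {h n : Nat} (h1 : 1 ≤ h) (hlo : 10 ^ (h - 1) ≤ n) (hhi : n < 10 ^ h) :
    (Nat.toDigits 10 n).length = h := by
  have hn1 : 1 ≤ n := le_trans (Nat.one_le_pow _ _ (by omega)) hlo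
  obtain ⟨hl, hu⟩ := td_len_bounds n hn1
  have hlp := td_len_pos n
  set L := (Nat.toDigits 10 n).length
  by_contra hne
  rcases Nat.lt_or_ge L h with hlt | hge
  · have : 10 ^ L ≤ 10 ^ (h - 1) := Nat.pow_le_pow_right (by omega) (by omega)
    omega
  · have : 10 ^ h ≤ 10 ^ (L - 1) := Nat.pow_le_pow_right (by omega) (by omega)
    omega

-- ---- valD lemmas ----
theorem val_shift : ∀ (es : List Char) (a : Nat),
    es.foldl (fun a c => a * 10 + (c.toNat - '0'.toNat)) a = a * 10 ^ es.length + valD es := by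
  intro es
  induction es with
  | nil => intro a; simp [valD]
  | cons e t ih =>
    intro a
    have hv : valD (e :: t) = (e.toNat - '0'.toNat) * 10 ^ t.length + valD t := by
      conv_lhs => simp only [valD, List.foldl_cons]
      rw [ih]
      norm_num
    simp only [List.foldl_cons, List.length_cons]
    rw [ih (a * 10 + (e.toNat - '0'.toNat)), hv]
    ring

theorem val_concat (ds es : List Char) :
    valD (ds ++ es) = valD ds * 10 ^ es.length + valD es := by
  simp only [valD, List.foldl_append]
  exact val_shift es _

theorem valD_td : ∀ n, valD (Nat.toDigits 10 n) = n := by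
  intro n
  induction n using Nat.strong_induction_on with
  | _ n ih =>
    by_cases h : n < 10
    · rw [td_small h]
      have := digitChar_val h
      simp [valD] at *
      omega
    · rw [td_rec (by omega), val_concat, ih (n / 10) (by omega)]
      have := digitChar_val (show n % 10 < 10 by omega)
      simp [valD] at *
      omega

theorem val_onezeros (k : Nat) : valD ('1' :: List.replicate k '0') = 10 ^ k := by
  simp only [valD, List.foldl_cons]
  rw [val_shift]
  have : valD (List.replicate k '0') = 0 := by
    induction k with
    | zero => simp [valD]
    | succ k ihk =>
      simp only [valD, List.replicate_succ, List.foldl_cons] at *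
      rw [val_shift] at *
      simpa using ihk
  rw [this]
  simp

-- ---- splitting a 2h-digit number's digit string ----
def padD : Nat → Nat → List Char
  | 0, _ => []
  | h + 1, b => padD h (b / 10) ++ [Nat.digitChar (b % 10)]

theorem td_split : ∀ (h : Nat) (a b : Nat), 1 ≤ a → b < 10 ^ h →
    Nat.toDigits 10 (a * 10 ^ h + b) = Nat.toDigits 10 a ++ padD h b := by
  intro h
  induction h with
  | zero => intro a b _ hb; interval_cases b; simp [padD]
  | succ h ih =>
    intro a b ha hb
    have hP : (10 : Nat) ^ (h + 1) = 10 ^ h * 10 := pow_succ 10 h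
    have hp1 : (10 : Nat) ≤ 10 ^ (h + 1) := by
      calc (10 : Nat) = 10 ^ 1 := (pow_one 10).symm
        _ ≤ 10 ^ (h + 1) := Nat.pow_le_pow_right (by omega) (by omega)
    have h10 : 10 ≤ a * 10 ^ (h + 1) + b := by
      have : 10 ^ (h + 1) ≤ a * 10 ^ (h + 1) := Nat.le_mul_of_pos_left _ (by omega)
      omega
    rw [td_rec h10]
    have hdiv : (a * 10 ^ (h + 1) + b) / 10 = a * 10 ^ h + b / 10 := by
      rw [hP, show a * (10 ^ h * 10) + b = 10 * (a * 10 ^ h) + b by ring,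
        Nat.mul_add_div (by norm_num)]
    have hmod : (a * 10 ^ (h + 1) + b) % 10 = b % 10 := by
      rw [hP, show a * (10 ^ h * 10) + b = b + a * 10 ^ h * 10 by ring,
        Nat.add_mul_mod_self_right]
    rw [hdiv, hmod, ih a (b / 10) ha (by rw [hP] at hb; omega)]
    simp [padD]

-- ---- bridges for the ports ----
theorem toChars_nonneg (m : Int) (h : 0 ≤ m) :
    PySem.Int.toChars m = Nat.toDigits 10 m.toNat := by
  simp [PySem.Int.toChars, not_lt.mpr h]

-- ===== main case lemmas =====

theorem main_odd (num : Int) (h1 : 1 ≤ num)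
    (hodd : (Nat.toDigits 10 num.toNat).length % 2 = 1) :
    first_candidate_after num = first_candidate_after_alt num := by
  set n := num.toNat with hn
  have hnum : num = (n : Int) := by omega
  set d := (Nat.toDigits 10 n).length with hd
  have hd1 : 1 ≤ d := td_len_pos n
  obtain ⟨hlo, hhi⟩ := td_len_bounds n (by omega)
  set k := (d - 1) / 2 with hk
  have hdk : d = 2 * k + 1 := by omega
  have hcd : count_digits num = (d : Int) := rfl
  have hmod : PySem.Int.mod (d : Int) 2 = 1 := by
    have := PySem.Int.mod_eq_emod_of_pos (a := (d : Int)) (b := 2) (by omega)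
    omega
  have hfd : (PySem.Int.floordiv ((d : Int) - 1) 2).toNat = k := by
    have := PySem.Int.floordiv_eq_ediv_of_pos (a := (d : Int) - 1) (b := 2) (by omega)
    omega
  have hfh : (PySem.Int.floordiv (d : Int) 2).toNat = k := by
    have := PySem.Int.floordiv_eq_ediv_of_pos (a := (d : Int)) (b := 2) (by omega)
    omega
  set l : List Char := '1' :: List.replicate k '0' with hl
  have hld : ∀ x ∈ l, x.isDigit = true := by
    intro x hx
    rcases List.mem_cons.mp hx with hx | hx
    · subst hx; decide
    · rw [List.eq_of_mem_replicate hx]; decide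
  have hllen : l.length = k + 1 := by simp [hl]
  have hvll : valD (l ++ l) = 10 ^ k * 10 ^ (k + 1) + 10 ^ k := by
    rw [val_concat, hllen, val_onezeros]
  have hparse : PySem.Int.ofStr? (String.ofList l ++ String.ofList l)
      = some ((valD (l ++ l) : Nat) : Int) := by
    rw [PySem.Int.ofStr?, String.toList_append, String.toList_ofList]
    exact parse_digits' (l ++ l) (by simp [hl])
      (fun x hx => by rcases List.mem_append.mp hx with hx | hx <;> exact hld x hx)
  have hnlt : n < valD (l ++ l) := by
    rw [show (10 : Nat) ^ d = 10 ^ k * 10 ^ (k + 1) by rw [hdk]; ring] at hhi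
    have h2 := hvll
    generalize hC : (10 : Nat) ^ k * 10 ^ (k + 1) = C at hhi h2
    have hkpos : 1 ≤ (10 : Nat) ^ k := Nat.one_le_pow _ _ (by omega)
    omega
  have hcond : ¬ ((valD (l ++ l) : Nat) : Int) ≤ num := by
    rw [hnum]; exact_mod_cast Nat.not_le.mpr hnlt
  -- evaluate port A
  have hA : first_candidate_after num = ((valD (l ++ l) : Nat) : Int) := by
    simp only [first_candidate_after, hcd]
    rw [if_pos hmod, hfd]
    rw [hparse, Option.getD_some]
    rw [show n + 2 = (n + 1) + 1 from rfl]
    simp only [fcaLoop]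
    rw [if_neg hcond]
  -- evaluate port B
  have hB : first_candidate_after_alt num = ((valD (l ++ l) : Nat) : Int) := by
    simp only [first_candidate_after_alt, hcd]
    rw [if_pos hmod, hfh]
    rw [hvll]
    push_cast
    ring
  rw [hA, hB]

theorem main_even (num : Int) (h1 : 1 ≤ num)
    (heven : (Nat.toDigits 10 num.toNat).length % 2 = 0) :
    first_candidate_after num = first_candidate_after_alt num := by
  set n := num.toNat with hn
  have hnum : num = (n : Int) := by omega
  set d := (Nat.toDigits 10 n).length with hd
  have hd1 : 1 ≤ d := td_len_pos n
  obtain ⟨hlo, hhi⟩ := td_len_bounds n (by omega)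
  set h := d / 2 with hh
  have hdh : d = 2 * h := by omega
  have hh1 : 1 ≤ h := by omega
  set P := (10 : Nat) ^ h with hP
  have hPpos : 1 ≤ P := Nat.one_le_pow _ _ (by omega)
  set top := n / P with htop
  set bot := n % P with hbot
  have hsplit : n = top * P + bot := by
    rw [htop, hbot]; exact (Nat.div_add_mod' n P).symm
  have hbotP : bot < P := Nat.mod_lt _ (by omega)
  have hPP : (10 : Nat) ^ d = P * P := by rw [hdh, hP]; ring
  have hlow' : (10 : Nat) ^ (d - 1) = 10 ^ (h - 1) * P := by
    rw [hP, ← pow_add]; congr 1; omega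
  have htop_lt : top < P := by
    rw [hPP] at hhi
    rw [htop]
    exact Nat.div_lt_of_lt_mul (by rw [mul_comm] at hhi ⊢; exact hhi)
  have htop_lo : 10 ^ (h - 1) ≤ top := by
    rw [hlow'] at hlo
    rw [htop]
    exact (Nat.le_div_iff_mul_le (by omega)).mpr hlo
  have htop1 : 1 ≤ top := le_trans (Nat.one_le_pow _ _ (by omega)) htop_lo
  have htd : Nat.toDigits 10 n = Nat.toDigits 10 top ++ padD h bot := by
    conv_lhs => rw [show n = top * P + bot from hsplit, hP]
    exact td_split h top bot htop1 (by rw [← hP]; exact hbotP)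
  have hlen_top : (Nat.toDigits 10 top).length = h :=
    td_len_eq hh1 htop_lo (by rw [← hP]; exact htop_lt)
  have hvtop : valD (Nat.toDigits 10 top) = top := valD_td top
  have hcd : count_digits num = (d : Int) := rfl
  have hmod : ¬ PySem.Int.mod (d : Int) 2 = 1 := by
    have := PySem.Int.mod_eq_emod_of_pos (a := (d : Int)) (b := 2) (by omega)
    omega
  have hfh : PySem.Int.floordiv (d : Int) 2 = (h : Int) := by
    have := PySem.Int.floordiv_eq_ediv_of_pos (a := (d : Int)) (b := 2) (by omega)
    omega
  -- the sliced half of A is the digit string of top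
  have hhalf : (PySem.Str.slice (PySem.Int.toStr num) none
      (some (PySem.Int.floordiv (d : Int) 2))).toList = Nat.toDigits 10 top := by
    rw [hfh]
    rw [PySem.Str.toList_slice, PySem.Chars.slice_eq_listSlice]
    rw [PySem.List.slice_to _ (Int.natCast_nonneg h)]
    rw [Int.toNat_natCast]
    rw [PySem.Int.toList_toStr, toChars_nonneg num (by omega), ← hn, htd, ← hlen_top,
      List.take_left]
  have htddig : ∀ m : Nat, ∀ x ∈ Nat.toDigits 10 m ++ Nat.toDigits 10 m, x.isDigit = true := by
    intro m x hx
    rcases List.mem_append.mp hx with hx | hx <;> exact td_digits m x hx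
  have htdne : ∀ m : Nat, Nat.toDigits 10 m ++ Nat.toDigits 10 m ≠ [] := by
    intro m hnil
    cases hcase : Nat.toDigits 10 m with
    | nil => exact td_ne_nil m hcase
    | cons a t => rw [hcase] at hnil; simp at hnil
  have hpA : PySem.Int.ofStr?
      (PySem.Str.slice (PySem.Int.toStr num) none (some (PySem.Int.floordiv (d : Int) 2)) ++
       PySem.Str.slice (PySem.Int.toStr num) none (some (PySem.Int.floordiv (d : Int) 2)))
      = some ((valD (Nat.toDigits 10 top ++ Nat.toDigits 10 top) : Nat) : Int) := by
    rw [PySem.Int.ofStr?, String.toList_append, hhalf]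
    exact parse_digits' _ (htdne top) (htddig top)
  have hvcat : valD (Nat.toDigits 10 top ++ Nat.toDigits 10 top) = top * P + top := by
    rw [val_concat, hlen_top, hvtop, ← hP]
  -- A reduced to the loop on out0 = top*P + top
  have hA0 : first_candidate_after num
      = fcaLoop num ((n + 1) + 1)
          (PySem.Str.slice (PySem.Int.toStr num) none (some (PySem.Int.floordiv (d : Int) 2)))
          ((top * P + top : Nat) : Int) := by
    simp only [first_candidate_after, hcd]
    rw [if_neg hmod, hpA, Option.getD_some, hvcat, ← hn]
  -- B reduced to its arithmetic branches
  have hBpow : ((10 : Int)) ^ ((PySem.Int.floordiv (d : Int) 2).toNat) = ((P : Nat) : Int) := by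
    rw [hfh, Int.toNat_natCast, hP]; push_cast; ring
  have hfdiv : PySem.Int.floordiv num ((P : Nat) : Int) = ((top : Nat) : Int) := by
    rw [hnum, htop]; exact_mod_cast PySem.Int.floordiv_natCast n P
  have hB0 : first_candidate_after_alt num
      = (if ((top : Nat) : Int) * (((P : Nat) : Int) + 1) > num
          then ((top : Nat) : Int) * (((P : Nat) : Int) + 1)
          else if ((top : Nat) : Int) + 1 = ((P : Nat) : Int)
            then ((P : Nat) : Int) * (10 * ((P : Nat) : Int) + 1)
            else (((top : Nat) : Int) + 1) * (((P : Nat) : Int) + 1)) := by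
    simp only [first_candidate_after_alt, hcd]
    rw [if_neg hmod, hBpow, hfdiv]
  rcases Nat.lt_or_ge n (top * P + top) with hgt | hle
  · -- the first candidate already exceeds num: no loop iteration
    have hcond : ¬ ((top * P + top : Nat) : Int) ≤ num := by
      rw [hnum]; exact_mod_cast Nat.not_le.mpr hgt
    have hBc : ((top : Nat) : Int) * (((P : Nat) : Int) + 1) > num := by
      rw [show ((top : Nat) : Int) * (((P : Nat) : Int) + 1) = ((top * P + top : Nat) : Int) by
        push_cast; ring]
      rw [hnum]; exact_mod_cast hgt
    rw [hA0, hB0]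
    simp only [fcaLoop]
    rw [if_neg hcond, if_pos hBc]
    push_cast; ring
  · -- one loop iteration: half becomes str(top+1)
    have hcond : ((top * P + top : Nat) : Int) ≤ num := by
      rw [hnum]; exact_mod_cast hle
    have hBc : ¬ ((top : Nat) : Int) * (((P : Nat) : Int) + 1) > num := by
      rw [show ((top : Nat) : Int) * (((P : Nat) : Int) + 1) = ((top * P + top : Nat) : Int) by
        push_cast; ring]
      rw [hnum]; exact_mod_cast Nat.not_lt.mpr hle
    -- int(half) = top, so the new half is str(top + 1)
    have hpHalf : PySem.Int.ofStr?
        (PySem.Str.slice (PySem.Int.toStr num) none (some (PySem.Int.floordiv (d : Int) 2)))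
        = some ((top : Nat) : Int) := by
      rw [PySem.Int.ofStr?, hhalf]
      rw [parse_digits' _ (by intro hc; exact td_ne_nil top hc) (td_digits top), hvtop]
    have hsucc : (((top : Nat) : Int) + 1) = (((top + 1 : Nat)) : Int) := by push_cast; ring
    have hpOut : PySem.Int.ofStr? (PySem.Int.toStr (((top + 1 : Nat)) : Int) ++
        PySem.Int.toStr (((top + 1 : Nat)) : Int))
        = some ((valD (Nat.toDigits 10 (top + 1) ++ Nat.toDigits 10 (top + 1)) : Nat) : Int) := by
      rw [PySem.Int.ofStr?, String.toList_append, PySem.Int.toList_toStr,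
        toChars_nonneg _ (Int.natCast_nonneg (top + 1)), Int.toNat_natCast]
      exact parse_digits' _ (htdne (top + 1)) (htddig (top + 1))
    have hA1 : first_candidate_after num
        = ((valD (Nat.toDigits 10 (top + 1) ++ Nat.toDigits 10 (top + 1)) : Nat) : Int) := by
      rw [hA0]
      simp only [fcaLoop]
      rw [if_pos hcond, hpHalf, Option.getD_some, hsucc, hpOut, Option.getD_some]
      have hstop : ¬ ((valD (Nat.toDigits 10 (top + 1) ++ Nat.toDigits 10 (top + 1)) : Nat) : Int)
          ≤ num := by
        rw [val_concat, valD_td]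
        have e1 : (top + 1) * P = top * P + P := by ring
        have hlenge : h ≤ (Nat.toDigits 10 (top + 1)).length := by
          by_contra hcon2
          push_neg at hcon2
          have hlb2 := (td_len_bounds (top + 1) (by omega)).2
          have hB2 : (10 : Nat) ^ (Nat.toDigits 10 (top + 1)).length ≤ 10 ^ (h - 1) :=
            Nat.pow_le_pow_right (by omega) (by omega)
          omega
        have hlen1 : P ≤ 10 ^ (Nat.toDigits 10 (top + 1)).length := by
          rw [hP]
          exact Nat.pow_le_pow_right (by omega) hlenge
        -- (top+1) * 10^len + (top+1) > n  since n < (top+1)*P ≤ (top+1)*10^len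
        have hkey : n < (top + 1) * 10 ^ (Nat.toDigits 10 (top + 1)).length + (top + 1) := by
          have h2 : n < (top + 1) * P := by omega
          have h3 : (top + 1) * P ≤ (top + 1) * 10 ^ (Nat.toDigits 10 (top + 1)).length :=
            Nat.mul_le_mul_left _ hlen1
          omega
        rw [hnum]
        exact_mod_cast Nat.not_le.mpr hkey
      rw [if_neg hstop]
    rcases Nat.lt_or_ge (top + 1) P with hlt | hge
    · -- top+1 still has h digits
      have hlen1 : (Nat.toDigits 10 (top + 1)).length = h :=
        td_len_eq hh1 (le_trans htop_lo (by omega)) (by rw [← hP]; exact hlt)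
      have hBc2 : ¬ ((top : Nat) : Int) + 1 = ((P : Nat) : Int) := by
        rw [hsucc]; exact_mod_cast (by omega : ¬ (top + 1) = P)
      rw [hA1, hB0, if_neg hBc, if_neg hBc2]
      rw [val_concat, valD_td, hlen1, ← hP]
      push_cast; ring
    · -- top+1 = P : the upper half was all nines, the mirror gains a digit
      have heq : top + 1 = P := by omega
      have hlen1 : (Nat.toDigits 10 (top + 1)).length = h + 1 := by
        refine td_len_eq (by omega) ?_ ?_
        · rw [heq]; simp [hP]
        · rw [heq, hP, pow_succ]
          have : (10 : Nat) ^ h ≥ 1 := Nat.one_le_pow _ _ (by omega)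
          omega
      have hBc2 : ((top : Nat) : Int) + 1 = ((P : Nat) : Int) := by
        rw [hsucc]; exact_mod_cast heq
      rw [hA1, hB0, if_neg hBc, if_pos hBc2]
      rw [val_concat, valD_td, hlen1, heq]
      rw [pow_succ, ← hP]
      push_cast; ring

-- ===== VERDICT (by name: the statement is the Claim_ definition above) =====
theorem first_candidate_after_spec : Claim_equal_first_candidate_after := by
  intro num _ hpre
  unfold Spec_first_candidate_after
  rcases Nat.even_or_odd ((Nat.toDigits 10 num.toNat).length) with he | ho
  · exact (main_even num hpre (Nat.even_iff.mp he)).symm ▸ rfl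
  · exact (main_odd num hpre (Nat.odd_iff.mp ho)).symm ▸ rfl
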